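-- pv_equiv track=rewrite | github.com/TrellixVulnTeam/My-code_CADK | python/checkDuyen.py | check_duyen
-- ===== SOURCE A (Python) =====
-- def check_duyen(nguoiNam,nguoiNu):
--     nguoiNam = nguoiNam.lower();
--     nguoiNu = nguoiNu.lower();
--     dem = 0;
--     for ki_tu in range(ord('a'),ord('z')+1):
--         if (chr(ki_tu) in nguoiNam) and (chr(ki_tu) in nguoiNu):
--             dem = dem + 1;
--
--     if dem == 0:
--         rsl =  ('Người dưng nước lã!');
--     elif dem <= 3:
--         rsl = ('friend zone');
--     elif dem > 3:
--         rsl = ('Hai bạn rất hợp nhau');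
--     return rsl;
-- ===== SOURCE B (Python) =====
-- def check_duyen(nguoiNam, nguoiNu):
--     def mask(s):
--         m = 0
--         for ch in s.lower():
--             o = ord(ch)
--             if 97 <= o <= 122:
--                 m |= 1 << (o - 97)
--         return m
--     dem = (mask(nguoiNam) & mask(nguoiNu)).bit_count()
--     if dem == 0:
--         return 'Người dưng nước lã!'
--     if dem <= 3:
--         return 'friend zone'
--     return 'Hai bạn rất hợp nhau'
-- ===== Notes on version B (the rewrite author's own statement) =====
-- stated objective: alternative
-- what changed: Each string is folded once into a 26-bit letter bitmask and dem is the popcount of the bitwise AND of the two masks, replacing A's 26-iteration alphabet loop with substring membership tests.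
import Mathlib
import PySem

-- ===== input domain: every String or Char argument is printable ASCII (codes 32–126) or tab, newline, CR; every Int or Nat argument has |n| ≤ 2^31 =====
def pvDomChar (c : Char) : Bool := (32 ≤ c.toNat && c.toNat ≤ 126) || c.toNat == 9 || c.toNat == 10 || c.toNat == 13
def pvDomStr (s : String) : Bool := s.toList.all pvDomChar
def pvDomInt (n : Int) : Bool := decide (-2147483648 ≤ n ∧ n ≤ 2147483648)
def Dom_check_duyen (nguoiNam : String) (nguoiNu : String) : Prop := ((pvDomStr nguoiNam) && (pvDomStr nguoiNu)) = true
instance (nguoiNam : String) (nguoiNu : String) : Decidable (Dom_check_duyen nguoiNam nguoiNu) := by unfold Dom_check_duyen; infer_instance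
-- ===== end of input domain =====

-- B folds each string once into a 26-bit letter bitmask and takes the popcount of the
-- AND of the two masks, instead of A's alphabet loop with substring membership tests
-- (objective: alternative).

-- ===== PORT A =====
def check_duyen (nguoiNam : String) (nguoiNu : String) : String :=
  let nam := PySem.Str.lower nguoiNam
  let nu := PySem.Str.lower nguoiNu
  let dem : Int := (PySem.List.pyRange 97 123 1).foldl
    (fun dem ki_tu =>
      if PySem.Str.isIn (String.singleton (Char.ofNat ki_tu.toNat)) nam
          && PySem.Str.isIn (String.singleton (Char.ofNat ki_tu.toNat)) nu
      then dem + 1 else dem) 0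
  if dem == 0 then "Người dưng nước lã!"
  else if dem ≤ 3 then "friend zone"
  else if 3 < dem then "Hai bạn rất hợp nhau"
  else ""  -- unreachable: Python would raise UnboundLocalError, but dem ≥ 0 always

-- ===== PORT B =====
-- B's helper mask(s): one pass over the lowered string, setting bit (ord(ch)-97) for
-- each letter a-z.  The shift amount (o - 97).toNat is exact: in the branch 97 ≤ o.
def pvMaskB (s : String) : Int :=
  (PySem.Str.lower s).toList.foldl
    (fun m ch =>
      let o : Int := ch.toNat
      if 97 ≤ o ∧ o ≤ 122 then PySem.Int.bor m ((1 : Int) <<< (o - 97).toNat) else m) 0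

def check_duyen_alt (nguoiNam : String) (nguoiNu : String) : String :=
  let dem : Int := (PySem.Int.bitCount (PySem.Int.band (pvMaskB nguoiNam) (pvMaskB nguoiNu)) : Int)
  if dem == 0 then "Người dưng nước lã!"
  else if dem ≤ 3 then "friend zone"
  else "Hai bạn rất hợp nhau"

-- ===== PRECONDITION & SPEC =====
def Spec_check_duyen (nguoiNam : String) (nguoiNu : String) (out : String) : Prop := out = check_duyen_alt nguoiNam nguoiNu
instance (nguoiNam : String) (nguoiNu : String) (out : String) : Decidable (Spec_check_duyen nguoiNam nguoiNu out) := by unfold Spec_check_duyen; infer_instance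

-- ===== CLAIM (what is proved, stated in full; the proofs are below) =====
def Claim_equal_check_duyen : Prop := ∀ (nguoiNam : String) (nguoiNu : String), Dom_check_duyen nguoiNam nguoiNu → Spec_check_duyen nguoiNam nguoiNu (check_duyen nguoiNam nguoiNu)

-- ===== LEMMAS AND PROOFS =====

-- Nat-level image of B's mask fold (proof vehicle only).
def pvNatMask (l : List Char) : Nat :=
  l.foldl (fun m ch => if 97 ≤ ch.toNat ∧ ch.toNat ≤ 122 then m ||| (1 <<< (ch.toNat - 97)) else m) 0

theorem pvMaskB_eq_natMask (s : String) :
    pvMaskB s = ((pvNatMask (PySem.Str.lower s).toList : Nat) : Int) := by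
  unfold pvMaskB pvNatMask
  generalize (PySem.Str.lower s).toList = l
  suffices h : ∀ (m : Nat), l.foldl
      (fun m ch =>
        let o : Int := ch.toNat
        if 97 ≤ o ∧ o ≤ 122 then PySem.Int.bor m ((1 : Int) <<< (o - 97).toNat) else m) (m : Int)
      = ((l.foldl (fun m ch => if 97 ≤ ch.toNat ∧ ch.toNat ≤ 122 then m ||| (1 <<< (ch.toNat - 97)) else m) m : Nat) : Int) by
    exact_mod_cast h 0
  induction l with
  | nil => intro m; rfl
  | cons c t ih =>
    intro m
    simp only [List.foldl_cons]
    by_cases hc : 97 ≤ c.toNat ∧ c.toNat ≤ 122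
    · have hc' : 97 ≤ (c.toNat : Int) ∧ (c.toNat : Int) ≤ 122 := by exact_mod_cast hc
      rw [if_pos hc', if_pos hc]
      have hsh : ((c.toNat : Int) - 97).toNat = c.toNat - 97 := by omega
      have h1 : ((1 : Int) <<< (c.toNat - 97)) = (((1 <<< (c.toNat - 97) : Nat) : Int)) := by
        simp [Int.shiftLeft_eq, Nat.shiftLeft_eq]
      rw [hsh, h1, PySem.Int.bor_natCast, ih]
    · have hc' : ¬ (97 ≤ (c.toNat : Int) ∧ (c.toNat : Int) ≤ 122) := by
        intro h; exact hc (by exact_mod_cast h)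
      rw [if_neg hc', if_neg hc, ih]

-- bit k of the mask says whether the list holds the letter with code 97+k
theorem pvNatMask_testBit (l : List Char) (k : Nat) :
    (pvNatMask l).testBit k
      = l.any (fun ch => decide (97 ≤ ch.toNat ∧ ch.toNat ≤ 122 ∧ ch.toNat - 97 = k)) := by
  unfold pvNatMask
  suffices h : ∀ (m : Nat), (l.foldl (fun m ch => if 97 ≤ ch.toNat ∧ ch.toNat ≤ 122 then m ||| (1 <<< (ch.toNat - 97)) else m) m).testBit k
      = (m.testBit k || l.any (fun ch => decide (97 ≤ ch.toNat ∧ ch.toNat ≤ 122 ∧ ch.toNat - 97 = k))) by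
    simpa using h 0
  induction l with
  | nil => simp
  | cons c t ih =>
    intro m
    simp only [List.foldl_cons, List.any_cons]
    by_cases hc : 97 ≤ c.toNat ∧ c.toNat ≤ 122
    · rw [if_pos hc, ih]
      have : ((1 <<< (c.toNat - 97) : Nat)).testBit k = decide (c.toNat - 97 = k) := by
        simp [Nat.shiftLeft_eq, Nat.testBit_two_pow]
      simp [Nat.testBit_or, this, hc.1, hc.2]
      by_cases hk : c.toNat - 97 = k <;> simp [hk]
    · rw [if_neg hc, ih]
      have : decide (97 ≤ c.toNat ∧ c.toNat ≤ 122 ∧ c.toNat - 97 = k) = false := by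
        simp; intro h1 h2; exact absurd ⟨h1, h2⟩ hc
      simp [this]

theorem pvNatMask_lt (l : List Char) : pvNatMask l < 2 ^ 26 := by
  unfold pvNatMask
  suffices h : ∀ (m : Nat), m < 2 ^ 26 → l.foldl (fun m ch => if 97 ≤ ch.toNat ∧ ch.toNat ≤ 122 then m ||| (1 <<< (ch.toNat - 97)) else m) m < 2 ^ 26 by
    exact h 0 (by norm_num)
  induction l with
  | nil => intro m hm; simpa using hm
  | cons c t ih =>
    intro m hm
    simp only [List.foldl_cons]
    by_cases hc : 97 ≤ c.toNat ∧ c.toNat ≤ 122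
    · rw [if_pos hc]
      refine ih _ (Nat.or_lt_two_pow hm ?_)
      have : c.toNat - 97 < 26 := by omega
      calc (1 <<< (c.toNat - 97) : Nat) = 2 ^ (c.toNat - 97) := by simp [Nat.shiftLeft_eq]
        _ < 2 ^ 26 := Nat.pow_lt_pow_right (by norm_num) this
    · rw [if_neg hc]; exact ih _ hm

-- popcount below 2^N is the number of set bits among the first N
theorem bitCount_eq_countP (N : Nat) : ∀ (m : Nat), m < 2 ^ N →
    PySem.Int.bitCount (m : Int) = (List.range N).countP m.testBit := by
  induction N with
  | zero =>
    intro m hm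
    interval_cases m
    simp [PySem.Int.bitCount_zero]
  | succ n ih =>
    intro m hm
    rcases Nat.eq_zero_or_pos m with h0 | h0
    · subst h0
      simp only [Nat.cast_zero]
      rw [PySem.Int.bitCount_zero]
      symm
      rw [List.countP_eq_zero]
      intro a _
      simp [Nat.zero_testBit]
    · rw [PySem.Int.bitCount_natCast h0, ih (m / 2) (by omega),
        List.range_succ_eq_map]
      simp only [List.countP_cons, List.countP_map]
      have ht0 : m.testBit 0 = decide (m % 2 = 1) := Nat.testBit_zero m
      have : (List.range n).countP (fun i => m.testBit (i + 1)) = (List.range n).countP (m / 2).testBit := by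
        apply List.countP_congr
        intro i _
        rw [Nat.testBit_add_one]
      simp only [Function.comp_def, Nat.succ_eq_add_one, this, ht0]
      by_cases hp : m % 2 = 1 <;> simp [hp] <;> omega

-- `c in s` for a single character is list membership
theorem isIn_singleton (c : Char) (l : List Char) : PySem.Chars.isIn [c] l = l.contains c := by
  by_cases h : c ∈ l
  · obtain ⟨s, t, rfl⟩ := List.append_of_mem h
    simp [(PySem.Chars.isIn_iff_infix [c] (s ++ c :: t)).mpr ⟨s, t, by simp⟩, h]
  · have : ¬ ([c] <:+: l) := fun hin => h (List.singleton_sublist.mp hin.sublist)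
    simp [(PySem.Chars.isIn_eq_false_iff [c] l).mpr this, h]

-- the two counts agree
theorem dem_eq (la lb : List Char) :
    ((PySem.List.pyRange 97 123 1).foldl
      (fun dem ki_tu =>
        if PySem.Chars.isIn [Char.ofNat ki_tu.toNat] la
            && PySem.Chars.isIn [Char.ofNat ki_tu.toNat] lb
        then dem + 1 else dem) (0 : Int))
    = ((PySem.Int.bitCount ((PySem.Int.band (pvNatMask la : Nat) (pvNatMask lb : Nat)) : Int) : Nat) : Int) := by
  rw [PySem.Int.band_natCast, bitCount_eq_countP 26 _ (lt_of_le_of_lt Nat.and_le_left (pvNatMask_lt la))]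
  rw [PySem.List.foldl_if_add_one, PySem.List.pyRange_one]
  simp only [List.countP_map, zero_add]
  norm_num
  apply List.countP_congr
  intro k hk
  simp only [List.mem_range] at hk
  have hk' : k < 26 := by omega
  have h1 : ((97 : Int) + (k : Int)).toNat = 97 + k := by omega
  have h2 : (Char.ofNat (97 + k)).toNat = 97 + k := by interval_cases k <;> decide
  simp only [Function.comp_def, h1, Nat.testBit_and, pvNatMask_testBit, isIn_singleton,
    List.contains_eq_any_beq]
  have hpred : (fun ch => decide (97 ≤ ch.toNat ∧ ch.toNat ≤ 122 ∧ ch.toNat - 97 = k))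
      = (fun ch : Char => Char.ofNat (97 + k) == ch) := by
    funext ch
    by_cases hch : ch.toNat = 97 + k
    · have hc : ch = Char.ofNat (97 + k) := by
        apply Char.ext
        apply UInt32.toNat_inj.mp
        show ch.toNat = (Char.ofNat (97 + k)).toNat
        rw [hch, h2]
      simp [hc, h2]; omega
    · have hne : Char.ofNat (97 + k) ≠ ch := fun he => hch (by rw [← he, h2])
      have hb : (Char.ofNat (97 + k) == ch) = false := by simp [hne]
      rw [hb]
      simp only [decide_eq_false_iff_not]
      intro hcon
      exact hch (by omega)
  rw [hpred]

-- ===== VERDICT (by name: the statement is the Claim_ definition above) =====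
theorem check_duyen_spec : Claim_equal_check_duyen := by
  intro nguoiNam nguoiNu _
  unfold Spec_check_duyen check_duyen check_duyen_alt
  simp only [PySem.Str.isIn_eq, String.toList_singleton, PySem.Str.toList_lower,
    pvMaskB_eq_natMask]
  rw [dem_eq]
  set d : Int := ((PySem.Int.bitCount ((PySem.Int.band (pvNatMask (PySem.Chars.lower nguoiNam.toList) : Nat) (pvNatMask (PySem.Chars.lower nguoiNu.toList) : Nat)) : Int) : Nat) : Int) with hd
  have h0 : (0 : Int) ≤ d := by positivity
  split_ifs with h1 h2 h3 <;> try rfl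
  omega
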